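-- pv_equiv track=rewrite | github.com/mkutarna/audiobook_gen | src/file_readers.py | find_num_index
-- ===== SOURCE A (Python) =====
-- def find_num_index(entry_string):
--     result0 = []
--
--     #fill result0 array with all the indexes of digit characters in a sentence
--     for i in range(len(entry_string)):
--         if (entry_string[i].isdigit() == True):
--             result0.append(i)
--
--     result1 = []
--
--     try:
--         result1.append(result0[0])
--     except IndexError:
--         result0 = 'null'
--     if(result0 != 'null'):
--
--     # append only indexes of first and last characters of numbers to result1 array
--         for k in range(len(result0) - 1):
--             if ((result0[k+1] - result0[k]) > 2):
--                 result1.append(result0[k])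
--                 result1.append(result0[k+1])
--         try:
--             result1.append(result0[len(result0) - 1])
--         except IndexError:
--             result1 = 'null'
--
--     # return array of even length that contains first and last index of every number in a sentence
--     return result1
-- ===== SOURCE B (Python) =====
-- def find_num_index(entry_string):
--     # single pass over the characters with a run state machine:
--     # no intermediate list of digit indices; a run (start, last) is kept
--     # while scanning and its boundaries are emitted when the run closes
--     out = []
--     start = last = None
--     for i, ch in enumerate(entry_string):
--         if ch.isdigit():
--             if start is None:
--                 start = last = i
--             elif i - last <= 2:
--                 last = i
--             else:
--                 out.append(start)
--                 out.append(last)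
--                 start = last = i
--     if start is not None:
--         out.append(start)
--         out.append(last)
--     return out
-- ===== Notes on version B (the rewrite author's own statement) =====
-- stated objective: alternative
-- what changed: B replaces A's two staged passes (collect all digit indices into a list, then gap-scan that list with try/except seeding) by one direct pass over the characters with a run state machine (start,last) that emits each run's boundaries as the run closes, never materialising the digit-index list.
import Mathlib
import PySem

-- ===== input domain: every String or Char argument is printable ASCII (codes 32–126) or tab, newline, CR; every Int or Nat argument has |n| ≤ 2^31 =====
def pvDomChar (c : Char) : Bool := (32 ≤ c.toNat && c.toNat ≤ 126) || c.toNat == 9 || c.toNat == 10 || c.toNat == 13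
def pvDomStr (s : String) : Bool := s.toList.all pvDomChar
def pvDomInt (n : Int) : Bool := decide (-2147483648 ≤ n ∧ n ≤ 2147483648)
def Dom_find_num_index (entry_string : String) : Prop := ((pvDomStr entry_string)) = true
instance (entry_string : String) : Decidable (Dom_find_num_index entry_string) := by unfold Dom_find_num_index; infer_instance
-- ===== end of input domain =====

-- B replaces A's two staged passes (collect digit indices, then gap-scan them) by a
-- single character pass with a run state machine emitting run boundaries (objective: alternative).

-- ===== PORT A =====
def find_num_index (entry_string : String) : List Int :=
  let cs := entry_string.toList
  -- for i in range(len(entry_string)): if entry_string[i].isdigit(): result0.append(i)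
  let result0 : List Int := (List.range cs.length).foldl
    (fun (acc : List Int) (i : Nat) => if PySem.Chars.isdigit cs[i]! then acc ++ [(i : Int)] else acc) []
  match result0 with
  | [] => []           -- result0[0] raises IndexError; result0 := 'null', skip block, return []
  | r0 :: _ =>
    let result1 : List Int := [r0]
    -- for k in range(len(result0) - 1): if result0[k+1] - result0[k] > 2: append both
    let result1 := (List.range (result0.length - 1)).foldl
      (fun acc k => if result0[k+1]! - result0[k]! > 2
        then acc ++ [result0[k]!] ++ [result0[k+1]!] else acc) result1
    result1 ++ [result0[result0.length - 1]!]

-- ===== PORT B =====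
-- state of B's loop: (out, current run as Option (start, last))
def pvBStep (st : List Int × Option (Int × Int)) (p : Int × Char) : List Int × Option (Int × Int) :=
  if PySem.Chars.isdigit p.2 then
    match st.2 with
    | none => (st.1, some (p.1, p.1))
    | some (s, l) =>
      if p.1 - l ≤ 2 then (st.1, some (s, p.1))
      else (st.1 ++ [s] ++ [l], some (p.1, p.1))
  else st

-- the 'if start is not None' epilogue
def pvBFinish (st : List Int × Option (Int × Int)) : List Int :=
  match st.2 with
  | none => st.1
  | some (s, l) => st.1 ++ [s] ++ [l]

def find_num_index_alt (entry_string : String) : List Int :=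
  pvBFinish ((PySem.List.enumerate entry_string.toList 0).foldl pvBStep ([], none))

-- ===== PRECONDITION & SPEC =====
def Spec_find_num_index (entry_string : String) (out : List Int) : Prop := out = find_num_index_alt entry_string
instance (entry_string : String) (out : List Int) : Decidable (Spec_find_num_index entry_string out) := by unfold Spec_find_num_index; infer_instance

-- ===== CLAIM (what is proved, stated in full; the proofs are below) =====
def Claim_equal_find_num_index : Prop := ∀ (entry_string : String), Dom_find_num_index entry_string → Spec_find_num_index entry_string (find_num_index entry_string)

-- ===== LEMMAS AND PROOFS =====

-- indices (from k on) of digit characters, structurally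
def pvDigitIdx : List Char → Nat → List Int
  | [], _ => []
  | c :: cs, k => (if PySem.Chars.isdigit c then [((k : Nat) : Int)] else []) ++ pvDigitIdx cs (k + 1)

-- A's gap pairs over consecutive digit indices, structurally
def pvPairs : Int → List Int → List Int
  | _, [] => []
  | p, x :: xs => (if x - p > 2 then [p, x] else []) ++ pvPairs x xs

def pvLast : Int → List Int → Int
  | p, [] => p
  | _, x :: xs => pvLast x xs

theorem pv_foldl_append_ite {α β : Type} (l : List α) (p : α → Prop) [DecidablePred p]
    (g : α → List β) (acc : List β) :
    l.foldl (fun a x => if p x then a ++ g x else a) acc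
      = acc ++ l.flatMap (fun x => if p x then g x else []) := by
  induction l generalizing acc with
  | nil => simp
  | cons x xs ih => by_cases h : p x <;> simp [h, ih]

theorem pv_A_idx (cs : List Char) (k : Nat) :
    (List.range cs.length).flatMap
        (fun i => if PySem.Chars.isdigit cs[i]! then [((i + k : Nat) : Int)] else [])
      = pvDigitIdx cs k := by
  induction cs generalizing k with
  | nil => simp [pvDigitIdx]
  | cons c cs ih =>
    rw [List.length_cons, List.range_succ_eq_map]
    have hsh : ∀ i : Nat, i + 1 + k = i + (k + 1) := fun i => by omega
    simp only [List.flatMap_cons, List.flatMap_map,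
      List.getElem!_cons_zero, List.getElem!_cons_succ, Nat.zero_add, hsh, pvDigitIdx]
    rw [← ih (k + 1)]

theorem pv_A_pairs (xs : List Int) (p : Int) :
    (List.range xs.length).flatMap
        (fun k => if (p :: xs)[k+1]! - (p :: xs)[k]! > 2
          then [(p :: xs)[k]!] ++ [(p :: xs)[k+1]!] else [])
      = pvPairs p xs := by
  induction xs generalizing p with
  | nil => simp [pvPairs]
  | cons x xs ih =>
    rw [List.length_cons, List.range_succ_eq_map]
    simp only [List.flatMap_cons, List.flatMap_map,
      List.getElem!_cons_zero, List.getElem!_cons_succ, pvPairs]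
    rw [← ih x]
    rfl

theorem pv_A_last (xs : List Int) (p : Int) :
    (p :: xs)[(p :: xs).length - 1]! = pvLast p xs := by
  induction xs generalizing p with
  | nil => simp [pvLast]
  | cons x xs ih => simpa [pvLast] using ih x

-- B's state machine, started inside a run (s, l), produces out ++ [s] ++ pairs ++ [last]
theorem pv_B_run (cs : List Char) (k : Nat) (out : List Int) (s l : Int) :
    pvBFinish ((PySem.List.enumerate cs (k : Int)).foldl pvBStep (out, some (s, l)))
      = out ++ [s] ++ pvPairs l (pvDigitIdx cs k) ++ [pvLast l (pvDigitIdx cs k)] := by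
  induction cs generalizing k out s l with
  | nil => simp [PySem.List.enumerate_nil, pvBFinish, pvDigitIdx, pvPairs, pvLast]
  | cons c cs ih =>
    rw [PySem.List.enumerate_cons, List.foldl_cons,
      show (k : Int) + 1 = ((k + 1 : Nat) : Int) by push_cast; ring]
    by_cases hd : PySem.Chars.isdigit c
    · by_cases hg : (k : Int) - l ≤ 2
      · rw [show pvBStep (out, some (s, l)) ((k : Int), c)
            = (out, some (s, (k : Int))) by simp [pvBStep, hd, hg]]
        rw [ih (k + 1) out s (k : Int)]
        simp [pvDigitIdx, hd, pvPairs, pvLast, if_neg (by omega : ¬ ((k : Int) - l > 2))]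
      · rw [show pvBStep (out, some (s, l)) ((k : Int), c)
            = (out ++ [s] ++ [l], some ((k : Int), (k : Int))) by simp [pvBStep, hd, hg]]
        rw [ih (k + 1) (out ++ [s] ++ [l]) (k : Int) (k : Int)]
        simp [pvDigitIdx, hd, pvPairs, pvLast, if_pos (by omega : (k : Int) - l > 2)]
    · rw [show pvBStep (out, some (s, l)) ((k : Int), c) = (out, some (s, l)) by
        simp [pvBStep, hd]]
      rw [ih (k + 1) out s l]
      simp [pvDigitIdx, hd]

-- B's state machine from the empty state
theorem pv_B_start (cs : List Char) (k : Nat) :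
    pvBFinish ((PySem.List.enumerate cs (k : Int)).foldl pvBStep ([], none))
      = (match pvDigitIdx cs k with
         | [] => []
         | i0 :: rest => [i0] ++ pvPairs i0 rest ++ [pvLast i0 rest]) := by
  induction cs generalizing k with
  | nil => simp [PySem.List.enumerate_nil, pvBFinish, pvDigitIdx]
  | cons c cs ih =>
    rw [PySem.List.enumerate_cons, List.foldl_cons,
      show (k : Int) + 1 = ((k + 1 : Nat) : Int) by push_cast; ring]
    by_cases hd : PySem.Chars.isdigit c
    · rw [show pvBStep ([], none) ((k : Int), c) = ([], some ((k : Int), (k : Int))) by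
        simp [pvBStep, hd]]
      rw [pv_B_run cs (k + 1) [] (k : Int) (k : Int)]
      simp [pvDigitIdx, hd]
    · rw [show pvBStep ([], none) ((k : Int), c) = ([], none) by simp [pvBStep, hd]]
      rw [ih (k + 1)]
      simp [pvDigitIdx, hd]

-- ===== VERDICT (by name: the statement is the Claim_ definition above) =====
theorem find_num_index_spec : Claim_equal_find_num_index := by
  intro s _
  unfold Spec_find_num_index find_num_index find_num_index_alt
  have hA : (List.range s.toList.length).foldl
      (fun (acc : List Int) (i : Nat) =>
        if PySem.Chars.isdigit s.toList[i]! then acc ++ [(i : Int)] else acc) []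
      = pvDigitIdx s.toList 0 := by
    rw [pv_foldl_append_ite (List.range s.toList.length)
      (fun i : Nat => PySem.Chars.isdigit s.toList[i]! = true)
      (fun i : Nat => [(i : Int)]) []]
    simpa using pv_A_idx s.toList 0
  have hB := pv_B_start s.toList 0
  simp only [Int.natCast_zero] at hB
  simp only [hA, hB]
  cases h : pvDigitIdx s.toList 0 with
  | nil => simp
  | cons i0 rest =>
    simp only [List.append_assoc]
    rw [pv_foldl_append_ite (List.range ((i0 :: rest).length - 1))
      (fun k : Nat => (i0 :: rest)[k+1]! - (i0 :: rest)[k]! > 2)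
      (fun k : Nat => [(i0 :: rest)[k]!] ++ [(i0 :: rest)[k+1]!]) [i0]]
    simp only [List.length_cons, Nat.add_sub_cancel]
    rw [pv_A_pairs rest i0]
    have hl : (i0 :: rest)[rest.length]! = pvLast i0 rest := by
      simpa using pv_A_last rest i0
    rw [hl]
    simp
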